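-- pv_equiv track=rewrite | github.com/robeertm/shelly-energy-analyzer | src/shelly_analyzer/services/updater.py | _pick_asset
-- ===== SOURCE A (Python) =====
-- from typing import Optional, Tuple
--
-- def _pick_asset(release: dict, platform_suffix: str) -> Tuple[Optional[str], Optional[str]]:
--     assets = release.get("assets") or []
--     want = f"_{platform_suffix}.zip"
--     for a in assets:
--         name = a.get("name") or ""
--         url = a.get("browser_download_url") or ""
--         if name.endswith(want) and url:
--             return url, name
--     # fallback: any zip
--     for a in assets:
--         name = a.get("name") or ""
--         url = a.get("browser_download_url") or ""
--         if name.lower().endswith(".zip") and url: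
--             return url, name
--     return None, None
-- ===== SOURCE B (Python) =====
-- def _pick_asset(release, platform_suffix):
--     want = f"_{platform_suffix}.zip"
--     fallback = (None, None)
--     for a in (release.get("assets") or []):
--         name = a.get("name") or ""
--         url = a.get("browser_download_url") or ""
--         if not url:
--             continue
--         if name.endswith(want):
--             return url, name
--         if fallback[0] is None and name.lower().endswith(".zip"):
--             fallback = (url, name)
--     return fallback
-- ===== Notes on version B (the rewrite author's own statement) =====
-- stated objective: simpler
-- what changed: Replaces A's two separate scans of the asset list by a single pass that returns immediately on an exact platform match and records the first valid zip as a fallback pair.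
import Mathlib
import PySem

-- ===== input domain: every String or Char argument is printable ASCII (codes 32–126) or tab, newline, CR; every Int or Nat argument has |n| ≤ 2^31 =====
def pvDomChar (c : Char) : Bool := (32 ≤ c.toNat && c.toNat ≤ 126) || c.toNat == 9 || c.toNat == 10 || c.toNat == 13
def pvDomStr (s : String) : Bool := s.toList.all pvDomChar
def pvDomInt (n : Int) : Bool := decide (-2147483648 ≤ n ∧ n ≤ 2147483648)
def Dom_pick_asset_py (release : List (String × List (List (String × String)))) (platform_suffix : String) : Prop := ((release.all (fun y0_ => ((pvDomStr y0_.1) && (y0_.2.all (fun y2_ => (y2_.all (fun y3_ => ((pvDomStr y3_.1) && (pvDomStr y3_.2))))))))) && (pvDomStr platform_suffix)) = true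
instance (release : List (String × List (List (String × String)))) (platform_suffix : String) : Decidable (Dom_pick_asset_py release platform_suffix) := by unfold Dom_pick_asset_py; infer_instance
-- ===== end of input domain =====

-- ===== PORT A =====
-- Header: B does one interleaved pass with a fallback pair instead of A's two scans (simpler); equal return values proved below.
-- A's "a.get(k) or ''" : missing key or empty string both give "" — ported as get?.getD "" (exact, since "" is the only falsy str).
def pvA_loop1 (want : String) : List (List (String × String)) → Option (String × String)
  | [] => none
  | a :: rest =>
    let name := ((PySem.Dict.mk a).get? "name").getD ""
    let url := ((PySem.Dict.mk a).get? "browser_download_url").getD ""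
    if PySem.Str.endswith name want && !(url == "") then some (url, name)
    else pvA_loop1 want rest

def pvA_loop2 : List (List (String × String)) → Option (String × String)
  | [] => none
  | a :: rest =>
    let name := ((PySem.Dict.mk a).get? "name").getD ""
    let url := ((PySem.Dict.mk a).get? "browser_download_url").getD ""
    if PySem.Str.endswith (PySem.Str.lower name) ".zip" && !(url == "") then some (url, name)
    else pvA_loop2 rest

def pick_asset_py (release : List (String × List (List (String × String)))) (platform_suffix : String) : Option String × Option String :=
  -- release.get("assets") or []: a missing key and an empty list both give []
  let assets := ((PySem.Dict.mk release).get? "assets").getD []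
  let want := "_" ++ platform_suffix ++ ".zip"
  match pvA_loop1 want assets with
  | some (u, n) => (some u, some n)
  | none =>
    match pvA_loop2 assets with
    | some (u, n) => (some u, some n)
    | none => (none, none)

-- ===== PORT B =====
def pvB_loop (want : String) : List (List (String × String)) → Option String × Option String → Option String × Option String
  | [], fb => fb
  | a :: rest, fb =>
    let name := ((PySem.Dict.mk a).get? "name").getD ""
    let url := ((PySem.Dict.mk a).get? "browser_download_url").getD ""
    if url == "" then pvB_loop want rest fb
    else if PySem.Str.endswith name want then (some url, some name)
    else if fb.1 == none && PySem.Str.endswith (PySem.Str.lower name) ".zip" then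
      pvB_loop want rest (some url, some name)
    else pvB_loop want rest fb

def pick_asset_py_alt (release : List (String × List (List (String × String)))) (platform_suffix : String) : Option String × Option String :=
  let want := "_" ++ platform_suffix ++ ".zip"
  pvB_loop want (((PySem.Dict.mk release).get? "assets").getD []) (none, none)

-- ===== PRECONDITION & SPEC =====
def Spec_pick_asset_py (release : List (String × List (List (String × String)))) (platform_suffix : String) (out : Option String × Option String) : Prop := out = pick_asset_py_alt release platform_suffix
instance (release : List (String × List (List (String × String)))) (platform_suffix : String) (out : Option String × Option String) : Decidable (Spec_pick_asset_py release platform_suffix out) := by unfold Spec_pick_asset_py; infer_instance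

-- ===== CLAIM (what is proved, stated in full; the proofs are below) =====
def Claim_equal_pick_asset_py : Prop := ∀ (release : List (String × List (List (String × String)))) (platform_suffix : String), Dom_pick_asset_py release platform_suffix → Spec_pick_asset_py release platform_suffix (pick_asset_py release platform_suffix)

-- ===== LEMMAS AND PROOFS =====

lemma pvB_loop_eq (want : String) (assets : List (List (String × String)))
    (fb : Option String × Option String) (h : fb.1 = none → fb = (none, none)) :
    pvB_loop want assets fb =
      match pvA_loop1 want assets with
      | some (u, n) => (some u, some n)
      | none =>
        if fb.1 = none then
          match pvA_loop2 assets with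
          | some (u, n) => (some u, some n)
          | none => (none, none)
        else fb := by
  induction assets generalizing fb with
  | nil =>
    cases hf : fb.1 with
    | none => simp [pvB_loop, pvA_loop1, pvA_loop2, h hf]
    | some u => simp [pvB_loop, pvA_loop1]
  | cons a rest ih =>
    simp only [pvB_loop, pvA_loop1, pvA_loop2]
    by_cases hu : ((((PySem.Dict.mk a).get? "browser_download_url").getD "") == "") = true
    · have hrec := ih fb h
      simp_all
    · by_cases he : PySem.Str.endswith (((PySem.Dict.mk a).get? "name").getD "") want = true
      · simp only [PySem.Str.endswith_eq] at he
        simp [he, hu]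
      · simp only [PySem.Str.endswith_eq] at he
        by_cases hz : PySem.Str.endswith (PySem.Str.lower (((PySem.Dict.mk a).get? "name").getD "")) ".zip" = true
        · simp [PySem.Str.endswith_eq, PySem.Str.toList_lower] at hz
          by_cases hfb1 : fb.1 = none
          · rw [ih (some (((PySem.Dict.mk a).get? "browser_download_url").getD ""),
                some (((PySem.Dict.mk a).get? "name").getD "")) (by simp)]
            simp [he, hz, hu, hfb1]
          · rw [ih fb h]
            simp [he, hz, hu, hfb1]
        · simp [PySem.Str.endswith_eq, PySem.Str.toList_lower] at hz
          rw [ih fb h]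
          by_cases hfb1 : fb.1 = none
          · simp [he, hz, hu, hfb1]
          · simp [he, hz, hu, hfb1]

-- ===== VERDICT (by name: the statement is the Claim_ definition above) =====
-- ===== VERDICT (by name: the statement is the Claim_ definition above) =====
theorem pick_asset_py_spec : Claim_equal_pick_asset_py := by
  intro release platform_suffix _hd
  unfold Spec_pick_asset_py pick_asset_py pick_asset_py_alt
  rw [pvB_loop_eq _ _ _ (fun _ => rfl)]
  rcases h1 : pvA_loop1 ("_" ++ platform_suffix ++ ".zip") (((PySem.Dict.mk release).get? "assets").getD []) with _ | p
  · rcases h2 : pvA_loop2 (((PySem.Dict.mk release).get? "assets").getD []) with _ | q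
    · simp [h1, h2]
    · simp [h1, h2]
  · simp [h1]
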